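-- pv_equiv track=rewrite | github.com/dodandre/invoice-bot | functions.py | _get_vendor_identifier_column
-- ===== SOURCE A (Python) =====
-- def _get_vendor_identifier_column(df_cols: list) -> str:
--     """Return a column that identifies vendor (LIFNR, vendor_number, vendor_name, NAME1) if present, else empty. Prefer vendor number for deduplication."""
--     for c in df_cols:
--         if not c:
--             continue
--         cu = (c or "").upper().replace(" ", "_")
--         if cu in ("LIFNR", "VENDOR_NUMBER") or cu == "VENDOR_NUMBER":
--             return c
--     for c in df_cols:
--         if not c:
--             continue
--         cu = (c or "").upper().replace(" ", "_")
--         if cu in ("NAME1", "VENDOR_NAME", "VENDOR_NAME_1") or "VENDOR_NAME" in cu: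
--             return c
--     return ""
-- ===== SOURCE B (Python) =====
-- def _get_vendor_identifier_column(df_cols: list) -> str:
--     """Single pass: return immediately on a vendor-number column, remember the
--     first vendor-name column as a fallback and return it after the scan."""
--     fallback = None
--     for c in df_cols:
--         if not c:
--             continue
--         cu = c.upper().replace(" ", "_")
--         if cu in ("LIFNR", "VENDOR_NUMBER"):
--             return c
--         if fallback is None and (cu in ("NAME1", "VENDOR_NAME", "VENDOR_NAME_1") or "VENDOR_NAME" in cu):
--             fallback = c
--     return fallback if fallback is not None else ""
-- ===== Notes on version B (the rewrite author's own statement) =====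
-- stated objective: simpler
-- what changed: Replaces A's two full scans (numbers pass, then names pass) with one single-pass loop that returns a number column immediately and keeps the first name column in a fallback variable returned after the scan.
import Mathlib
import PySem

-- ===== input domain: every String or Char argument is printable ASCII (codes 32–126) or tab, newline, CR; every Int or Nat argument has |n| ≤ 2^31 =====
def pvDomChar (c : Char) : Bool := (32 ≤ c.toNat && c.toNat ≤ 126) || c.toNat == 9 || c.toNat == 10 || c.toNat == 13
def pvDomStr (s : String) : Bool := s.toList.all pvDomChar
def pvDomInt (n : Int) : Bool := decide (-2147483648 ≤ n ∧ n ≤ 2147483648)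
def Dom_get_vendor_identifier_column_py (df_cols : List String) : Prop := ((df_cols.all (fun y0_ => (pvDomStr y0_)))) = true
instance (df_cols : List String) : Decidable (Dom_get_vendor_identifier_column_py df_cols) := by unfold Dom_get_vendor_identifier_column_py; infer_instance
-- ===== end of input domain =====

-- B is a single-pass merge of A's two scans (number match returns at once, first
-- name match is kept as a fallback); same return value, simpler control flow.

-- ===== PORT A =====
-- first loop of A: return the first vendor-number column (early return modelled as Option)
def pvLoopNum (l : List String) : Option String :=
  match l with
  | [] => none
  | c :: rest =>
    if c == "" then pvLoopNum rest
    else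
      let cu := PySem.Str.replace (PySem.Str.upper c) " " "_"
      if (cu == "LIFNR" || cu == "VENDOR_NUMBER") || cu == "VENDOR_NUMBER" then some c
      else pvLoopNum rest

-- second loop of A: return the first vendor-name column
def pvLoopName (l : List String) : Option String :=
  match l with
  | [] => none
  | c :: rest =>
    if c == "" then pvLoopName rest
    else
      let cu := PySem.Str.replace (PySem.Str.upper c) " " "_"
      if (cu == "NAME1" || cu == "VENDOR_NAME" || cu == "VENDOR_NAME_1") || PySem.Str.isIn "VENDOR_NAME" cu then some c
      else pvLoopName rest

def get_vendor_identifier_column_py (df_cols : List String) : String :=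
  match pvLoopNum df_cols with
  | some c => c
  | none =>
    match pvLoopName df_cols with
    | some c => c
    | none => ""

-- ===== PORT B =====
-- the single loop of B, carrying the fallback variable
def pvAltLoop (l : List String) (fallback : Option String) : String :=
  match l with
  | [] => match fallback with | some f => f | none => ""
  | c :: rest =>
    if c == "" then pvAltLoop rest fallback
    else
      let cu := PySem.Str.replace (PySem.Str.upper c) " " "_"
      if cu == "LIFNR" || cu == "VENDOR_NUMBER" then c
      else if fallback == none &&
          ((cu == "NAME1" || cu == "VENDOR_NAME" || cu == "VENDOR_NAME_1") || PySem.Str.isIn "VENDOR_NAME" cu) then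
        pvAltLoop rest (some c)
      else pvAltLoop rest fallback

def get_vendor_identifier_column_py_alt (df_cols : List String) : String :=
  pvAltLoop df_cols none

-- ===== PRECONDITION & SPEC =====
def Spec_get_vendor_identifier_column_py (df_cols : List String) (out : String) : Prop := out = get_vendor_identifier_column_py_alt df_cols
instance (df_cols : List String) (out : String) : Decidable (Spec_get_vendor_identifier_column_py df_cols out) := by unfold Spec_get_vendor_identifier_column_py; infer_instance

-- ===== CLAIM (what is proved, stated in full; the proofs are below) =====
def Claim_equal_get_vendor_identifier_column_py : Prop := ∀ (df_cols : List String), Dom_get_vendor_identifier_column_py df_cols → Spec_get_vendor_identifier_column_py df_cols (get_vendor_identifier_column_py df_cols)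

-- ===== LEMMAS AND PROOFS =====
-- invariant of B's loop: it equals "first number match, else the fallback, else A's first name match"
theorem pvAltLoop_eq (l : List String) (fb : Option String) :
    pvAltLoop l fb =
      match pvLoopNum l with
      | some c => c
      | none =>
        match fb with
        | some f => f
        | none => match pvLoopName l with | some c => c | none => "" := by
  induction l generalizing fb with
  | nil => cases fb <;> simp [pvAltLoop, pvLoopNum, pvLoopName]
  | cons c rest ih =>
    by_cases hc : c == ""
    · simp [pvAltLoop, pvLoopNum, pvLoopName, hc, ih]
    · set cu := PySem.Str.replace (PySem.Str.upper c) " " "_" with hcu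
      by_cases hnum : (cu = "LIFNR" ∨ cu = "VENDOR_NUMBER")
      · simp [pvAltLoop, pvLoopNum, hc, ← hcu, or_self_right, hnum]
      · by_cases hname : ((cu = "NAME1" ∨ cu = "VENDOR_NAME") ∨ cu = "VENDOR_NAME_1") ∨
            PySem.Chars.isIn ['V','E','N','D','O','R','_','N','A','M','E'] cu.toList = true
        · cases fb <;>
            simp [pvAltLoop, pvLoopNum, pvLoopName, hc, ← hcu, hnum, hname, ih]
        · simp [pvAltLoop, pvLoopNum, pvLoopName, hc, ← hcu, hnum, hname, ih]

-- ===== VERDICT (by name: the statement is the Claim_ definition above) =====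
theorem get_vendor_identifier_column_py_spec : Claim_equal_get_vendor_identifier_column_py := by
  intro df_cols _
  show get_vendor_identifier_column_py df_cols = get_vendor_identifier_column_py_alt df_cols
  rw [get_vendor_identifier_column_py_alt, pvAltLoop_eq, get_vendor_identifier_column_py]
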